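-- pv_equiv track=rewrite | github.com/Simontwice/Portal-to-ISAbelle | src/main/python/misc_utils.py | premise_name_to_possible_isabelle_formats
-- ===== SOURCE A (Python) =====
-- def premise_name_to_possible_isabelle_formats(premise_name):
--     """
--     DEPRECATED, JOB TAKEN OVER BY "CHECK IF TRANSLATE_PREMISE_NAMES
--     Args:
--         premise_name:
--
--     Returns:
--
--     """
--     if any(
--         [premise_name.endswith(f"_{i}") for i in range(40)]
--     ):  # if the premise is of the form assms_1, which in Isabelle is actually assms(1)
--         name_split = premise_name.split("_")
--         prefix = "_".join(name_split[:-1])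
--         suffix = "(" + name_split[-1] + ")"
--         possible_names = [prefix + suffix, premise_name]
--     else:
--         possible_names = [premise_name]
--     return possible_names
-- ===== SOURCE B (Python) =====
-- _SUFFIXES = {str(i) for i in range(40)}
--
--
-- def premise_name_to_possible_isabelle_formats(premise_name):
--     i = premise_name.rfind("_")
--     if i == -1:
--         return [premise_name]
--     token = premise_name[i + 1:]
--     if token in _SUFFIXES:
--         return [premise_name[:i] + "(" + token + ")", premise_name]
--     return [premise_name]
-- ===== Notes on version B (the rewrite author's own statement) =====
-- stated objective: idiomatic
-- what changed: Instead of testing 40 endswith suffixes and then re-splitting the whole name on every underscore, B locates the last underscore once with rfind, tests the tail token by a single membership lookup in a precomputed set of the forty decimal digit strings below forty, and slices prefix and token directly from the string.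
import Mathlib
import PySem

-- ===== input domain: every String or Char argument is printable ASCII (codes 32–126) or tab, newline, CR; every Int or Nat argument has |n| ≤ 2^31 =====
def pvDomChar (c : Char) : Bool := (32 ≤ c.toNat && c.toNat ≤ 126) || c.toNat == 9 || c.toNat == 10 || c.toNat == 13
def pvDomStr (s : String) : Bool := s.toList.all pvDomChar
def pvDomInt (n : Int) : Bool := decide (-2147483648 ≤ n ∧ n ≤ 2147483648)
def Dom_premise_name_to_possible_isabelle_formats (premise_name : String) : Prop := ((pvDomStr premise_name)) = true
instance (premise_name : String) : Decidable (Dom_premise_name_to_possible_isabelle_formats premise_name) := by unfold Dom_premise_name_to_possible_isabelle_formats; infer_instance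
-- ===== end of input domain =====

-- B replaces A's 40 endswith probes plus full split/join by one rfind of the last
-- underscore, a single set lookup of the tail token, and two direct slices (idiomatic).

-- ===== PORT A =====
def premise_name_to_possible_isabelle_formats (premise_name : String) : List String :=
  if ((PySem.List.pyRange 0 40 1).map
        (fun i => PySem.Str.endswith premise_name ("_" ++ PySem.Int.toStr i))).any (fun b => b) then
    -- premise_name.split("_"): the separator "_" is nonempty, so split? is always `some`
    let name_split := (PySem.Str.split? premise_name "_").getD []
    let prefix_ := PySem.Str.join "_" (PySem.List.slice name_split none (some (-1)))
    -- name_split[-1]: split always returns a nonempty list, so the default is never used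
    let suffix := "(" ++ PySem.List.pyGetD name_split (-1) "" ++ ")"
    [prefix_ ++ suffix, premise_name]
  else
    [premise_name]

-- ===== PORT B =====
-- _SUFFIXES = {str(i) for i in range(40)}
def pvSuffixes : PySem.Set String :=
  PySem.Set.ofList ((PySem.List.pyRange 0 40 1).map PySem.Int.toStr)

def premise_name_to_possible_isabelle_formats_alt (premise_name : String) : List String :=
  let i := PySem.Str.rfind premise_name "_"
  if i == -1 then [premise_name]
  else
    let token := PySem.Str.slice premise_name (some (i + 1)) none
    if pvSuffixes.contains token then
      [PySem.Str.slice premise_name none (some i) ++ "(" ++ token ++ ")", premise_name]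
    else
      [premise_name]

-- ===== PRECONDITION & SPEC =====
def Spec_premise_name_to_possible_isabelle_formats (premise_name : String) (out : List String) : Prop := out = premise_name_to_possible_isabelle_formats_alt premise_name
instance (premise_name : String) (out : List String) : Decidable (Spec_premise_name_to_possible_isabelle_formats premise_name out) := by unfold Spec_premise_name_to_possible_isabelle_formats; infer_instance

-- ===== CLAIM (what is proved, stated in full; the proofs are below) =====
def Claim_equal_premise_name_to_possible_isabelle_formats : Prop := ∀ (premise_name : String), Dom_premise_name_to_possible_isabelle_formats premise_name → Spec_premise_name_to_possible_isabelle_formats premise_name (premise_name_to_possible_isabelle_formats premise_name)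

-- ===== LEMMAS AND PROOFS =====

theorem pvUnderscoreToList : "_".toList = ['_'] := by decide

theorem pvStrExt {a b : String} (h : a.toList = b.toList) : a = b := by
  rw [← String.ofList_toList (s := a), h, String.ofList_toList]

-- the token lists "0","1",…,"39" as lists of chars
def pvTokensC : List (List Char) := (PySem.List.pyRange 0 40 1).map PySem.Int.toChars

theorem pvTokensC_no_underscore : ∀ u ∈ pvTokensC, '_' ∉ u := by decide

-- structural model of Python's str.split("_")
def pvSp : List Char → List (List Char)
  | [] => [[]]
  | c :: rest =>
    if c = '_' then [] :: pvSp rest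
    else
      match pvSp rest with
      | [] => [[c]]
      | t :: ts => (c :: t) :: ts

theorem pvSp_ne_nil (l : List Char) : pvSp l ≠ [] := by
  cases l with
  | nil => simp [pvSp]
  | cons c rest =>
    simp only [pvSp]
    split
    · simp
    · split <;> simp

theorem splitOn_go_eq (l : List Char) : ∀ (fuel : Nat) (cur : List Char) (acc : List (List Char)),
    l.length ≤ fuel →
    PySem.Chars.splitOn.go ['_'] fuel l cur acc
      = acc.reverse ++ (pvSp l).modifyHead (cur.reverse ++ ·) := by
  induction l with
  | nil =>
    intro fuel cur acc _
    cases fuel <;> simp [PySem.Chars.splitOn.go, pvSp]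
  | cons c rest ih =>
    intro fuel cur acc hf
    cases fuel with
    | zero => simp at hf
    | succ f =>
      by_cases hc : c = '_'
      · subst hc
        have hpt : (List.isPrefixOf ['_'] ('_' :: rest)) = true := by
          simp [List.isPrefixOf]
        rw [show PySem.Chars.splitOn.go ['_'] (f+1) ('_' :: rest) cur acc
              = PySem.Chars.splitOn.go ['_'] f rest [] (cur.reverse :: acc) from by
            simp [PySem.Chars.splitOn.go, hpt]]
        rw [ih f [] (cur.reverse :: acc) (by simpa using hf)]
        simp only [pvSp, List.reverse_cons, List.reverse_nil, List.nil_append]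
        rcases pvSp rest with _ | ⟨t, ts⟩ <;> simp [List.modifyHead]
      · have hpf : (List.isPrefixOf ['_'] (c :: rest)) = false := by
          simp [List.isPrefixOf]
          exact fun h => absurd h.symm hc
        rw [show PySem.Chars.splitOn.go ['_'] (f+1) (c :: rest) cur acc
              = PySem.Chars.splitOn.go ['_'] f rest (c :: cur) acc from by
            simp [PySem.Chars.splitOn.go, hpf]]
        rw [ih f (c :: cur) acc (by simpa using hf)]
        simp only [pvSp, if_neg hc]
        rcases h : pvSp rest with _ | ⟨t, ts⟩
        · exact absurd h (pvSp_ne_nil rest)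
        · simp

theorem splitOn_eq (cs : List Char) : PySem.Chars.splitOn cs ['_'] = pvSp cs := by
  rw [PySem.Chars.splitOn, splitOn_go_eq cs (cs.length + 1) [] [] (by omega)]
  rcases h : pvSp cs with _ | ⟨t, ts⟩
  · exact absurd h (pvSp_ne_nil cs)
  · simp

theorem pvSp_no_sep (l : List Char) (h : '_' ∉ l) : pvSp l = [l] := by
  induction l with
  | nil => simp [pvSp]
  | cons c rest ih =>
    simp only [List.mem_cons, not_or] at h
    simp [pvSp, Ne.symm h.1, ih h.2]

theorem pvSp_append (p t : List Char) (ht : '_' ∉ t) :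
    pvSp (p ++ '_' :: t) = pvSp p ++ [t] := by
  induction p with
  | nil => simp [pvSp, pvSp_no_sep t ht]
  | cons c p' ih =>
    by_cases hc : c = '_'
    · subst hc; simp [pvSp, ih]
    · simp only [List.cons_append, pvSp, if_neg hc, ih]
      rcases h : pvSp p' with _ | ⟨u, us⟩
      · exact absurd h (pvSp_ne_nil p')
      · rw [h] at ih
        simp

theorem join_pvSp (p : List Char) : PySem.Chars.join ['_'] (pvSp p) = p := by
  induction p with
  | nil => simp [pvSp, PySem.Chars.join_singleton]
  | cons c p' ih =>
    by_cases hc : c = '_'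
    · subst hc
      have hsp : pvSp ('_' :: p') = [] :: pvSp p' := by simp [pvSp]
      rw [hsp]
      rcases h : pvSp p' with _ | ⟨u, us⟩
      · exact absurd h (pvSp_ne_nil p')
      · rw [h] at ih
        rw [PySem.Chars.join_cons_cons, ih]
        rfl
    · rcases h : pvSp p' with _ | ⟨u, us⟩
      · exact absurd h (pvSp_ne_nil p')
      · have hsp : pvSp (c :: p') = (c :: u) :: us := by simp [pvSp, hc, h]
        rw [hsp]
        rw [h] at ih
        cases us with
        | nil =>
          rw [PySem.Chars.join_singleton]
          rw [PySem.Chars.join_singleton] at ih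
          rw [ih]
        | cons v vs =>
          rw [PySem.Chars.join_cons_cons]
          rw [PySem.Chars.join_cons_cons] at ih
          rw [List.cons_append, List.cons_append, ih]

theorem rfind_go_no_sep (l : List Char) (h : '_' ∉ l) :
    ∀ n : Nat, PySem.Chars.rfind.go l ['_'] n = -1 := by
  have hp : ∀ i : Nat, (List.isPrefixOf ['_'] (List.drop i l)) = false := by
    intro i
    rw [Bool.eq_false_iff]
    intro hpre
    rw [List.isPrefixOf_iff_prefix] at hpre
    exact h (List.mem_of_mem_drop (hpre.mem (by simp)))
  intro n
  induction n with
  | zero =>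
    have h0 := hp 0
    rw [List.drop_zero] at h0
    simp [PySem.Chars.rfind.go, h0]
  | succ j ih => simp [PySem.Chars.rfind.go, hp (j + 1), ih]

theorem rfind_go_last (p t : List Char) (ht : '_' ∉ t) :
    ∀ n : Nat, p.length ≤ n →
    PySem.Chars.rfind.go (p ++ '_' :: t) ['_'] n = (p.length : Int) := by
  have hat : (List.isPrefixOf ['_'] (List.drop p.length (p ++ '_' :: t))) = true := by
    rw [List.drop_left]
    simp [List.isPrefixOf]
  have habove : ∀ j : Nat, p.length < j →
      (List.isPrefixOf ['_'] (List.drop j (p ++ '_' :: t))) = false := by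
    intro j hj
    rw [Bool.eq_false_iff]
    intro hpre
    rw [List.isPrefixOf_iff_prefix] at hpre
    have hmem : '_' ∈ List.drop j (p ++ '_' :: t) := hpre.mem (by simp)
    have hrw : List.drop j (p ++ '_' :: t) = List.drop (j - p.length - 1) t := by
      rw [show p ++ '_' :: t = (p ++ ['_']) ++ t by simp, List.drop_append]
      rw [List.drop_eq_nil_of_le (by simp; omega), List.nil_append]
      congr 1
      simp
      omega
    rw [hrw] at hmem
    exact ht (List.mem_of_mem_drop hmem)
  intro n
  induction n with
  | zero =>
    intro hn
    have hp0 : p = [] := by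
      cases p with
      | nil => rfl
      | cons => simp at hn
    subst hp0
    simp [PySem.Chars.rfind.go, List.isPrefixOf]
  | succ j ih =>
    intro hn
    by_cases hj : p.length = j + 1
    · simp [PySem.Chars.rfind.go, hj]
    · have hlt : p.length ≤ j := by omega
      simp [PySem.Chars.rfind.go, habove (j + 1) (by omega), ih hlt]

theorem rfind_no_sep (cs : List Char) (h : '_' ∉ cs) : PySem.Chars.rfind cs ['_'] = -1 := by
  rw [PySem.Chars.rfind]; exact rfind_go_no_sep cs h _

theorem rfind_last (p t : List Char) (ht : '_' ∉ t) :
    PySem.Chars.rfind (p ++ '_' :: t) ['_'] = (p.length : Int) := by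
  rw [PySem.Chars.rfind]
  exact rfind_go_last p t ht _ (by simp)

theorem exists_last (cs : List Char) (h : '_' ∈ cs) :
    ∃ p t, cs = p ++ '_' :: t ∧ '_' ∉ t := by
  induction cs with
  | nil => simp at h
  | cons c rest ih =>
    by_cases hr : '_' ∈ rest
    · obtain ⟨p, t, h1, h2⟩ := ih hr
      exact ⟨c :: p, t, by simp [h1], h2⟩
    · have hc : c = '_' := by
        rcases List.mem_cons.mp h with h1 | h1
        · exact h1.symm
        · exact absurd h1 hr
      exact ⟨[], rest, by simp [hc], hr⟩

theorem last_token_unique {p t u cs : List Char} (hcs : cs = p ++ '_' :: t) (ht : '_' ∉ t)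
    (hu : ('_' :: u) <:+ cs) (hun : '_' ∉ u) : u = t := by
  have ht' : ('_' :: t) <:+ cs := hcs ▸ ⟨p, rfl⟩
  rcases List.suffix_or_suffix_of_suffix hu ht' with h | h
  · rcases h with ⟨v, hv⟩
    cases v with
    | nil => simpa using hv
    | cons a v' =>
      exfalso
      simp only [List.cons_append] at hv
      obtain ⟨ha, hrest⟩ := List.cons.injEq .. ▸ hv
      have : '_' ∈ t := by
        rw [← hrest]; simp
      exact ht this
  · rcases h with ⟨v, hv⟩
    cases v with
    | nil => simpa using hv.symm
    | cons a v' =>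
      exfalso
      simp only [List.cons_append] at hv
      obtain ⟨ha, hrest⟩ := List.cons.injEq .. ▸ hv
      have : '_' ∈ u := by
        rw [← hrest]; simp
      exact hun this

theorem condA_iff (s : String) :
    ((((PySem.List.pyRange 0 40 1).map
        (fun i => PySem.Str.endswith s ("_" ++ PySem.Int.toStr i))).any (fun b => b)) = true)
      ↔ ∃ t ∈ pvTokensC, ('_' :: t) <:+ s.toList := by
  simp only [List.any_eq_true, List.mem_map, pvTokensC]
  constructor
  · rintro ⟨b, ⟨i, hi, rfl⟩, hb⟩
    refine ⟨PySem.Int.toChars i, ⟨i, hi, rfl⟩, ?_⟩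
    have h2 := (PySem.Chars.endswith_iff s.toList ("_" ++ PySem.Int.toStr i).toList).mp (by simpa using hb)
    simpa [PySem.Int.toStr, String.toList_append, pvUnderscoreToList] using h2
  · rintro ⟨t, ⟨i, hi, rfl⟩, hsuf⟩
    refine ⟨_, ⟨i, hi, rfl⟩, ?_⟩
    have : PySem.Chars.endswith s.toList ("_" ++ PySem.Int.toStr i).toList = true :=
      (PySem.Chars.endswith_iff _ _).mpr
        (by simpa [PySem.Int.toStr, String.toList_append, pvUnderscoreToList] using hsuf)
    simpa using this

theorem contains_iff_tok (w : String) :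
    (pvSuffixes.contains w = true) ↔ w.toList ∈ pvTokensC := by
  rw [PySem.Set.contains_iff, pvSuffixes, PySem.Set.mem_ofList]
  simp only [List.mem_map, pvTokensC]
  constructor
  · rintro ⟨i, hi, rfl⟩
    exact ⟨i, hi, by simp [PySem.Int.toStr]⟩
  · rintro ⟨i, hi, h⟩
    refine ⟨i, hi, ?_⟩
    rw [← String.ofList_toList (s := w), ← h]
    rfl

theorem pvMain (s : String) :
    premise_name_to_possible_isabelle_formats s = premise_name_to_possible_isabelle_formats_alt s := by
  by_cases h : '_' ∈ s.toList
  · obtain ⟨p, t, hcs, hnt⟩ := exists_last _ h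
    have hr : PySem.Str.rfind s "_" = (p.length : Int) := by
      rw [PySem.Str.rfind, pvUnderscoreToList, hcs, rfind_last p t hnt]
    have hne : ((PySem.Str.rfind s "_") == (-1 : Int)) = false := by
      rw [hr]; simp
    have htok : PySem.Str.slice s (some (PySem.Str.rfind s "_" + 1)) none = String.ofList t := by
      rw [hr, PySem.Str.slice]
      congr 1
      rw [hcs, show ((p.length : Int) + 1) = (((p.length + 1 : Nat)) : Int) by push_cast; ring]
      rw [PySem.Chars.slice_eq_listSlice, PySem.List.slice_from_natCast]
      rw [show p ++ '_' :: t = (p ++ ['_']) ++ t by simp,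
          show p.length + 1 = (p ++ ['_']).length by simp, List.drop_left]
    have hprefB : PySem.Str.slice s none (some (PySem.Str.rfind s "_")) = String.ofList p := by
      rw [hr, PySem.Str.slice]
      congr 1
      rw [hcs, PySem.Chars.slice_eq_listSlice, PySem.List.slice_to_natCast, List.take_left]
    by_cases hmem : t ∈ pvTokensC
    · have hA : ((((PySem.List.pyRange 0 40 1).map
          (fun i => PySem.Str.endswith s ("_" ++ PySem.Int.toStr i))).any (fun b => b)) = true) :=
        (condA_iff s).mpr ⟨t, hmem, hcs ▸ ⟨p, rfl⟩⟩
      have hB' : pvSuffixes.contains (String.ofList t) = true := by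
        rw [contains_iff_tok]
        simpa [String.toList_ofList] using hmem
      have hsplit : (PySem.Str.split? s "_").getD []
          = (pvSp p).map String.ofList ++ [String.ofList t] := by
        rw [PySem.Str.split?, pvUnderscoreToList, PySem.Chars.split?]
        simp only [List.isEmpty_cons, Bool.false_eq_true, if_false]
        rw [hcs, splitOn_eq, pvSp_append p t hnt]
        simp
      have hAval : premise_name_to_possible_isabelle_formats s
          = [PySem.Str.join "_" ((pvSp p).map String.ofList) ++ ("(" ++ String.ofList t ++ ")"), s] := by
        unfold premise_name_to_possible_isabelle_formats
        simp only [hA, if_true, hsplit, PySem.List.slice_to_neg_one, List.dropLast_concat,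
                   PySem.List.pyGetD_neg_one_append_singleton]
      have hBval : premise_name_to_possible_isabelle_formats_alt s
          = [String.ofList p ++ "(" ++ String.ofList t ++ ")", s] := by
        unfold premise_name_to_possible_isabelle_formats_alt
        simp only [hne, Bool.false_eq_true, if_false, htok, hprefB, hB', if_true]
      rw [hAval, hBval]
      have hfirst : PySem.Str.join "_" ((pvSp p).map String.ofList) ++ ("(" ++ String.ofList t ++ ")")
          = String.ofList p ++ "(" ++ String.ofList t ++ ")" := by
        apply pvStrExt
        have hj : (PySem.Str.join "_" ((pvSp p).map String.ofList)).toList = p := by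
          rw [PySem.Str.join, String.toList_ofList, pvUnderscoreToList, List.map_map,
              show (String.toList ∘ String.ofList) = @id (List Char) from
                funext (fun l => String.toList_ofList),
              List.map_id, join_pvSp]
        simp only [String.toList_append, hj, String.toList_ofList, List.append_assoc]
      rw [hfirst]
    · have hA : ((((PySem.List.pyRange 0 40 1).map
          (fun i => PySem.Str.endswith s ("_" ++ PySem.Int.toStr i))).any (fun b => b)) = false) := by
        rw [Bool.eq_false_iff]
        intro hc
        obtain ⟨u, humem, husuf⟩ := (condA_iff s).mp hc
        have := last_token_unique hcs hnt husuf (pvTokensC_no_underscore u humem)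
        exact hmem (this ▸ humem)
      have hB' : pvSuffixes.contains (String.ofList t) = false := by
        rw [Bool.eq_false_iff]
        intro hc
        rw [contains_iff_tok] at hc
        exact hmem (by simpa [String.toList_ofList] using hc)
      have hAval : premise_name_to_possible_isabelle_formats s = [s] := by
        unfold premise_name_to_possible_isabelle_formats
        simp only [hA, Bool.false_eq_true, if_false]
      have hBval : premise_name_to_possible_isabelle_formats_alt s = [s] := by
        unfold premise_name_to_possible_isabelle_formats_alt
        simp only [hne, Bool.false_eq_true, if_false, htok, hB']
      rw [hAval, hBval]
  · have hA : ((((PySem.List.pyRange 0 40 1).map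
        (fun i => PySem.Str.endswith s ("_" ++ PySem.Int.toStr i))).any (fun b => b)) = false) := by
      rw [Bool.eq_false_iff]
      intro hc
      obtain ⟨u, _, husuf⟩ := (condA_iff s).mp hc
      exact h (husuf.mem (by simp))
    have hB : ((PySem.Str.rfind s "_") == (-1 : Int)) = true := by
      rw [PySem.Str.rfind, pvUnderscoreToList, rfind_no_sep _ h]
      rfl
    have hAval : premise_name_to_possible_isabelle_formats s = [s] := by
      unfold premise_name_to_possible_isabelle_formats
      simp only [hA, Bool.false_eq_true, if_false]
    have hBval : premise_name_to_possible_isabelle_formats_alt s = [s] := by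
      unfold premise_name_to_possible_isabelle_formats_alt
      simp only [hB, if_true]
    rw [hAval, hBval]

-- ===== VERDICT (by name: the statement is the Claim_ definition above) =====
theorem premise_name_to_possible_isabelle_formats_spec : Claim_equal_premise_name_to_possible_isabelle_formats := by
  intro s _
  unfold Spec_premise_name_to_possible_isabelle_formats
  exact pvMain s
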